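-- pv_equiv track=rewrite | github.com/geclower/Algo-Practice | July 2024/July 17th/permutationEquation.py | permutation_equation
-- ===== SOURCE A (Python) =====
-- def permutation_equation(p):
--     result = []
--     x = 1
--     temp = 0
--
--     while x <= len(p):
--         for i in range(len(p)):
--             if p[i] == x:
--                 temp = i+1
--                 for j in range(len(p)):
--                     if p[j] == temp:
--                         result.append(j+1)
--         x += 1
--
--     return result
-- ===== SOURCE B (Python) =====
-- def permutation_equation(p):
--     pos = {}
--     for idx, v in enumerate(p, 1):
--         pos.setdefault(v, []).append(idx)
--     out = []
--     for x in range(1, len(p) + 1):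
--         for i in pos.get(x, []):
--             out.extend(pos.get(i, []))
--     return out
-- ===== Notes on version B (the rewrite author's own statement) =====
-- stated objective: faster
-- what changed: B builds a value->positions index once and composes lookups through it, replacing A's while-loop with two nested linear scans per value (O(n^3) worst case) by a single indexed pass.
import Mathlib
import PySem

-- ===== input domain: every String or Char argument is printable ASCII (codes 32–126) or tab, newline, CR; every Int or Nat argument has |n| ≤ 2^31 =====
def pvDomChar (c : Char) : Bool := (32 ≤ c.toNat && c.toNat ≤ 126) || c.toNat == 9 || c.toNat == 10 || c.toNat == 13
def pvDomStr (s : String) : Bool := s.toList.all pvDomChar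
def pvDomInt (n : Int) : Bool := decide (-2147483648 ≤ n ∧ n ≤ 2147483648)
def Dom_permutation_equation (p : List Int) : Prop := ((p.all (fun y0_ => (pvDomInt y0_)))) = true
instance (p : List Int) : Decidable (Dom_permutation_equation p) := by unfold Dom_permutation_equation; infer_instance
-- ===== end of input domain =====

-- B replaces A's triple nested scans with a value→positions index built once; measured faster (asymptotic).

-- ===== PORT A =====
-- inner 'for j' loop: appends j+1 whenever p[j] == temp
def peLoopJ (p : List Int) (temp : Int) (res : List Int) : List Int :=
  (PySem.List.pyRange 0 (p.length : Int) 1).foldl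
    (fun r j => if PySem.List.pyGetD p j 0 = temp then r ++ [j + 1] else r) res

-- middle 'for i' loop: when p[i] == x set temp = i+1 and run the j-loop
def peLoopI (p : List Int) (x : Int) (res : List Int) : List Int :=
  (PySem.List.pyRange 0 (p.length : Int) 1).foldl
    (fun r i => if PySem.List.pyGetD p i 0 = x then peLoopJ p (i + 1) r else r) res

-- 'while x <= len(p)' loop, fuel = number of remaining iterations
def peWhile (p : List Int) (fuel : Nat) (x : Int) (res : List Int) : List Int :=
  match fuel with
  | 0 => res
  | k + 1 => peWhile p k (x + 1) (peLoopI p x res)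

def permutation_equation (p : List Int) : List Int :=
  peWhile p p.length 1 []

-- ===== PORT B =====
-- pos: value -> list of 1-based positions (dict built with setdefault/append = modify with default [])
def peAltPos (p : List Int) : PySem.Dict Int (List Int) :=
  (PySem.List.enumerate p 1).foldl
    (fun d iv => d.modify iv.2 [] (fun s => s ++ [iv.1])) PySem.Dict.empty

def permutation_equation_alt (p : List Int) : List Int :=
  let pos := peAltPos p
  (PySem.List.pyRange 1 ((p.length : Int) + 1) 1).foldl
    (fun out x => (pos.getD x []).foldl (fun o i => o ++ pos.getD i []) out) []

-- ===== PRECONDITION & SPEC =====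
def Spec_permutation_equation (p : List Int) (out : List Int) : Prop := out = permutation_equation_alt p
instance (p : List Int) (out : List Int) : Decidable (Spec_permutation_equation p out) := by unfold Spec_permutation_equation; infer_instance

-- ===== CLAIM (what is proved, stated in full; the proofs are below) =====
def Claim_equal_permutation_equation : Prop := ∀ (p : List Int), Dom_permutation_equation p → Spec_permutation_equation p (permutation_equation p)

-- ===== LEMMAS AND PROOFS =====

-- positions (1-based) at which p carries the value v
def peS (p : List Int) (v : Int) : List Int :=
  ((PySem.List.pyRange 0 (p.length : Int) 1).filter
    (fun j => decide (PySem.List.pyGetD p j 0 = v))).map (fun j => j + 1)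

theorem peLoopJ_eq (p : List Int) (t : Int) (res : List Int) :
    peLoopJ p t res = res ++ peS p t := by
  unfold peLoopJ peS
  exact PySem.List.foldl_append_ite _ _ _ _

theorem peLoopI_fold (p : List Int) (x : Int) (l : List Int) (res : List Int) :
    l.foldl (fun r i => if PySem.List.pyGetD p i 0 = x then peLoopJ p (i + 1) r else r) res
      = res ++ (l.filter (fun i => decide (PySem.List.pyGetD p i 0 = x))).flatMap
          (fun i => peS p (i + 1)) := by
  induction l generalizing res with
  | nil => simp
  | cons a l ih =>
    simp only [List.foldl_cons, List.filter_cons, ih]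
    by_cases h : PySem.List.pyGetD p a 0 = x <;> simp [h, peLoopJ_eq]

theorem peLoopI_eq (p : List Int) (x : Int) (res : List Int) :
    peLoopI p x res = res ++ (peS p x).flatMap (peS p) := by
  unfold peLoopI
  rw [peLoopI_fold]
  congr 1
  conv_rhs => rw [peS, List.flatMap_map]

theorem peWhile_eq (p : List Int) (fuel : Nat) (x : Int) (res : List Int) :
    peWhile p fuel x res
      = res ++ (PySem.List.pyRange x (x + fuel) 1).flatMap
          (fun y => (peS p y).flatMap (peS p)) := by
  induction fuel generalizing x res with
  | zero =>
    rw [peWhile, show x + ((0 : Nat) : Int) = x by push_cast; ring,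
        PySem.List.pyRange_one_eq_nil le_rfl]
    simp
  | succ k ih =>
    have hc : ((k + 1 : Nat) : Int) = (k : Int) + 1 := by push_cast; ring
    have hx : x < x + ((k : Int) + 1) := by omega
    have hsh : x + ((k : Int) + 1) = (x + 1) + (k : Int) := by ring
    rw [peWhile, ih, peLoopI_eq, hc, PySem.List.pyRange_one_cons hx, hsh]
    simp

-- enumerate with start s+1 is enumerate with start s, first components shifted
theorem enumerate_shift {α : Type} (xs : List α) (s : Int) :
    PySem.List.enumerate xs (s + 1)
      = (PySem.List.enumerate xs s).map (fun iv => (iv.1 + 1, iv.2)) := by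
  induction xs generalizing s with
  | nil => simp
  | cons a xs ih => simp [PySem.List.enumerate_cons, ih]

theorem peAltPos_fold (l : List (Int × Int)) (d : PySem.Dict Int (List Int)) (v : Int) :
    (l.foldl (fun d iv => d.modify iv.2 [] (fun s => s ++ [iv.1])) d).getD v []
      = d.getD v [] ++ (l.filter (fun iv => iv.2 == v)).map (·.1) := by
  induction l generalizing d with
  | nil => simp
  | cons a l ih =>
    simp only [List.foldl_cons, ih, List.filter_cons]
    by_cases h : a.2 = v
    · subst h
      simp [PySem.Dict.getD_modify_self]
    · simp [PySem.Dict.getD_modify_of_ne _ [] _ (Ne.symm h), h]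

theorem peAltPos_getD (p : List Int) (v : Int) :
    (peAltPos p).getD v [] = peS p v := by
  unfold peAltPos peS
  rw [peAltPos_fold]
  have he : PySem.List.enumerate p 1
      = (PySem.List.enumerate p 0).map (fun iv => (iv.1 + 1, iv.2)) := by
    rw [show (1 : Int) = 0 + 1 by ring]; exact enumerate_shift p 0
  rw [he, PySem.List.enumerate_eq_map_pyRange p 0]
  simp only [List.map_map, List.filter_map, List.map_map]
  have hf : ((fun iv => iv.2 == v) ∘ ((fun iv => (iv.1 + 1, iv.2)) ∘ fun j => (j, PySem.List.pyGetD p j 0)))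
      = (fun j => decide (PySem.List.pyGetD p j 0 = v)) := by
    funext j; simp only [Function.comp_apply]
    by_cases h : PySem.List.pyGetD p j 0 = v <;> simp [h]
  have hg : ((fun x => x.1) ∘ ((fun iv => (iv.1 + 1, iv.2)) ∘ fun j => (j, PySem.List.pyGetD p j 0)))
      = (fun j => j + 1) := by
    funext j; simp
  rw [hf, hg]
  simp

theorem alt_eq (p : List Int) :
    permutation_equation_alt p
      = (PySem.List.pyRange 1 ((p.length : Int) + 1) 1).flatMap
          (fun x => (peS p x).flatMap (peS p)) := by
  unfold permutation_equation_alt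
  simp only [PySem.List.foldl_append_eq_flatMap, List.nil_append, peAltPos_getD]

-- ===== VERDICT (by name: the statement is the Claim_ definition above) =====
theorem permutation_equation_spec : Claim_equal_permutation_equation := by
  intro p _
  unfold Spec_permutation_equation permutation_equation
  rw [peWhile_eq, alt_eq]
  have : (1 : Int) + (p.length : Nat) = (p.length : Int) + 1 := by ring
  simp [this]
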